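-- pv_equiv track=rewrite | github.com/phicycle/SEOSage | src/seoninja/agents/orchestrator/orchestrator.py | _create_frequency_matrix
-- ===== SOURCE A (Python) =====
-- from typing import Dict, Any, List, Optional, Tuple
--
-- def _create_frequency_matrix(flows: List[Dict[str, Any]]) -> Dict[str, Dict[str, int]]:
--     """Create communication frequency matrix."""
--     matrix = {}
--     for flow in flows:
--         source = flow['source']
--         target = flow['target']
--         if source not in matrix:
--             matrix[source] = {}
--         matrix[source][target] = matrix[source].get(target, 0) + 1
--     return matrix
-- ===== SOURCE B (Python) =====
-- def _create_frequency_matrix(flows):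
--     """Create communication frequency matrix (count pairs, then reshape)."""
--     counts = {}
--     for flow in flows:
--         key = (flow['source'], flow['target'])
--         counts[key] = counts.get(key, 0) + 1
--     matrix = {}
--     for (source, target), count in counts.items():
--         matrix.setdefault(source, {})[target] = count
--     return matrix
-- ===== Notes on version B (the rewrite author's own statement) =====
-- stated objective: alternative
-- what changed: Replaces A's single incremental nested-dict-increment loop with a two-pass count-then-reshape decomposition: a flat tuple-keyed frequency dict built in one pass, then a second differently-shaped pass over its items populating the nested dict via setdefault.
import Mathlib
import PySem

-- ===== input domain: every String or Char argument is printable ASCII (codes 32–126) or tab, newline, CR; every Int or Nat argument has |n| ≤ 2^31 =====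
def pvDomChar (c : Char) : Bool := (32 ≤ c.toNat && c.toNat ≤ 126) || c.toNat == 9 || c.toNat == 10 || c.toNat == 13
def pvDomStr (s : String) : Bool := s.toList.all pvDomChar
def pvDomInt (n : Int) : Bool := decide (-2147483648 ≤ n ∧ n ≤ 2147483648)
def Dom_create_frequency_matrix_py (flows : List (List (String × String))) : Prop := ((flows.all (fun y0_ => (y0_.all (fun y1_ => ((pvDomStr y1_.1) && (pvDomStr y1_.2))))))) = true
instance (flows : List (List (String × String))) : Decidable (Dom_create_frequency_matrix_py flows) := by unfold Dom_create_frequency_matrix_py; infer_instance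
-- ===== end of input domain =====

-- B replaces A's single incremental nested-dict-increment loop by a count-then-reshape
-- decomposition (flat tuple-keyed count pass, then a reshape pass over its items); same cost.

-- ===== PORT A =====
-- one loop iteration of A: matrix[source][target] = matrix[source].get(target, 0) + 1
def pvAStep (m : PySem.Dict String (PySem.Dict String Int)) (flow : List (String × String)) :
    PySem.Dict String (PySem.Dict String Int) :=
  match (PySem.Dict.ofList flow).get? "source" with
  | none => m        -- KeyError in Python; excluded by Pre_
  | some source =>
    match (PySem.Dict.ofList flow).get? "target" with
    | none => m      -- KeyError in Python; excluded by Pre_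
    | some target =>
      let m1 := if m.contains source then m else m.insert source PySem.Dict.empty
      let inner := m1.getD source PySem.Dict.empty
      m1.insert source (inner.insert target (inner.getD target 0 + 1))

def create_frequency_matrix_py (flows : List (List (String × String))) : List (String × List (String × Int)) :=
  ((flows.foldl pvAStep PySem.Dict.empty).items).map (fun p => (p.1, p.2.items))

-- ===== PORT B =====
-- first pass of B: counts[key] = counts.get(key, 0) + 1 with key = (flow['source'], flow['target'])
def pvBCount (c : PySem.Dict (String × String) Int) (flow : List (String × String)) :
    PySem.Dict (String × String) Int :=
  match (PySem.Dict.ofList flow).get? "source" with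
  | none => c        -- KeyError in Python; excluded by Pre_
  | some source =>
    match (PySem.Dict.ofList flow).get? "target" with
    | none => c      -- KeyError in Python; excluded by Pre_
    | some target =>
      c.insert (source, target) (c.getD (source, target) 0 + 1)

-- second pass of B: matrix.setdefault(source, {})[target] = count
def pvBReshape (m : PySem.Dict String (PySem.Dict String Int)) (it : (String × String) × Int) :
    PySem.Dict String (PySem.Dict String Int) :=
  let m1 := m.setdefault it.1.1 PySem.Dict.empty
  m1.insert it.1.1 ((m1.getD it.1.1 PySem.Dict.empty).insert it.1.2 it.2)

def create_frequency_matrix_py_alt (flows : List (List (String × String))) : List (String × List (String × Int)) :=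
  let counts := flows.foldl pvBCount PySem.Dict.empty
  (((counts.items).foldl pvBReshape PySem.Dict.empty).items).map (fun p => (p.1, p.2.items))

-- ===== PRECONDITION & SPEC =====
-- Pre_ excludes exactly the flows missing a 'source' or 'target' key, where Python raises KeyError.
def Pre_create_frequency_matrix_py (flows : List (List (String × String))) : Prop :=
  (flows.all (fun f => (PySem.Dict.ofList f).contains "source" && (PySem.Dict.ofList f).contains "target")) = true
instance (flows : List (List (String × String))) : Decidable (Pre_create_frequency_matrix_py flows) := by
  unfold Pre_create_frequency_matrix_py; infer_instance

def pvWitness_create_frequency_matrix_py : (List (List (String × String))) :=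
  [[("source", "a"), ("target", "b")], [("source", "a"), ("target", "b")]]

def Spec_create_frequency_matrix_py (flows : List (List (String × String))) (out : List (String × List (String × Int))) : Prop := out = create_frequency_matrix_py_alt flows
instance (flows : List (List (String × String))) (out : List (String × List (String × Int))) : Decidable (Spec_create_frequency_matrix_py flows out) := by unfold Spec_create_frequency_matrix_py; infer_instance

-- ===== CLAIM (what is proved, stated in full; the proofs are below) =====
def Claim_equal_create_frequency_matrix_py : Prop := ∀ (flows : List (List (String × String))), Dom_create_frequency_matrix_py flows → Pre_create_frequency_matrix_py flows → Spec_create_frequency_matrix_py flows (create_frequency_matrix_py flows)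

-- ===== LEMMAS AND PROOFS =====

-- normal form of one A-iteration on the extracted (source, target) pair
def pvNStep (m : PySem.Dict String (PySem.Dict String Int)) (p : String × String) :
    PySem.Dict String (PySem.Dict String Int) :=
  m.insert p.1 ((m.getD p.1 PySem.Dict.empty).insert p.2 ((m.getD p.1 PySem.Dict.empty).getD p.2 0 + 1))

def pvCStep (c : PySem.Dict (String × String) Int) (p : String × String) : PySem.Dict (String × String) Int :=
  c.insert p (c.getD p 0 + 1)

def pvPair (flow : List (String × String)) : Option (String × String) :=
  match (PySem.Dict.ofList flow).get? "source", (PySem.Dict.ofList flow).get? "target" with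
  | some s, some t => some (s, t)
  | _, _ => none

def pvReshape (c : PySem.Dict (String × String) Int) : PySem.Dict String (PySem.Dict String Int) :=
  (c.items).foldl pvBReshape PySem.Dict.empty

theorem pvBReshape_eq (m : PySem.Dict String (PySem.Dict String Int)) (q : (String × String) × Int) :
    pvBReshape m q = m.insert q.1.1 ((m.getD q.1.1 PySem.Dict.empty).insert q.1.2 q.2) := by
  simp only [pvBReshape]
  by_cases h : m.contains q.1.1
  · rw [PySem.Dict.setdefault_of_contains _ _ h]
  · rw [PySem.Dict.setdefault_of_not_contains _ _ (by simp [h])]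
    rw [PySem.Dict.getD_insert_self, PySem.Dict.insert_insert_self,
        PySem.Dict.getD_of_not_contains _ _ (by simpa using h)]

theorem pvAStep_eq (m : PySem.Dict String (PySem.Dict String Int)) (flow : List (String × String))
    (s t : String) (hs : (PySem.Dict.ofList flow).get? "source" = some s)
    (ht : (PySem.Dict.ofList flow).get? "target" = some t) :
    pvAStep m flow = pvNStep m (s, t) := by
  simp only [pvAStep, pvNStep]
  rw [hs, ht]
  by_cases h : m.contains s
  · simp only [h, if_true]
  · simp only [h, if_false, Bool.false_eq_true]
    rw [PySem.Dict.getD_insert_self, PySem.Dict.insert_insert_self,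
        PySem.Dict.getD_of_not_contains _ _ (by simpa using h),
        PySem.Dict.getD_of_not_contains m _ (by simpa using h)]
    simp

theorem pvBCount_eq (c : PySem.Dict (String × String) Int) (flow : List (String × String))
    (s t : String) (hs : (PySem.Dict.ofList flow).get? "source" = some s)
    (ht : (PySem.Dict.ofList flow).get? "target" = some t) :
    pvBCount c flow = pvCStep c (s, t) := by
  unfold pvBCount pvCStep; rw [hs, ht]

-- two inserts at distinct keys commute when the first key is already present
theorem pvInsComm {κ ν : Type} [BEq κ] [LawfulBEq κ] (d : PySem.Dict κ ν) (k k' : κ) (x y : ν)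
    (hk : d.contains k = true) (hne : k ≠ k') :
    (d.insert k x).insert k' y = (d.insert k' y).insert k x := by
  apply PySem.Dict.ext
  by_cases h' : d.contains k'
  · rw [PySem.Dict.items_insert_of_contains _ _ (by simp [PySem.Dict.contains_insert, h']),
        PySem.Dict.items_insert_of_contains _ _ hk,
        PySem.Dict.items_insert_of_contains _ _ (by simp [PySem.Dict.contains_insert, hk]),
        PySem.Dict.items_insert_of_contains _ _ h', List.map_map, List.map_map]
    apply List.map_congr_left
    intro p _
    simp only [Function.comp_apply]
    by_cases h1 : p.1 = k <;> by_cases h2 : p.1 = k' <;>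
      simp_all [beq_iff_eq]
  · rw [PySem.Dict.items_insert_of_not_contains _ _ (by simp [PySem.Dict.contains_insert, h', Ne.symm hne]),
        PySem.Dict.items_insert_of_contains _ _ hk,
        PySem.Dict.items_insert_of_contains _ _ (by simp [PySem.Dict.contains_insert, hk]),
        PySem.Dict.items_insert_of_not_contains _ _ (by simpa using h'), List.map_append]
    simp [beq_iff_eq, Ne.symm hne]

theorem pvCommute (m : PySem.Dict String (PySem.Dict String Int)) (q : (String × String) × Int)
    (s t : String) (hne : q.1 ≠ (s, t)) (hs : m.contains s = true)
    (ht : (m.getD s PySem.Dict.empty).contains t = true) :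
    pvBReshape (pvNStep m (s, t)) q = pvNStep (pvBReshape m q) (s, t) := by
  rw [pvBReshape_eq, pvBReshape_eq]
  unfold pvNStep
  by_cases hss : q.1.1 = s
  · have htt : q.1.2 ≠ t := by
      intro h; apply hne; rw [← hss, ← h]
    rw [hss]
    rw [PySem.Dict.getD_insert_self, PySem.Dict.insert_insert_self,
        PySem.Dict.getD_insert_self, PySem.Dict.insert_insert_self,
        PySem.Dict.getD_insert_of_ne _ _ _ (Ne.symm htt)]
    congr 1
    exact pvInsComm _ t q.1.2 _ _ ht (Ne.symm htt)
  · rw [PySem.Dict.getD_insert_of_ne _ _ _ hss,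
        PySem.Dict.getD_insert_of_ne _ _ _ (Ne.symm hss)]
    exact pvInsComm m s q.1.1 _ _ hs (Ne.symm hss)

theorem pvBReshape_contains (m : PySem.Dict String (PySem.Dict String Int))
    (q : (String × String) × Int) (s : String) (hs : m.contains s = true) :
    (pvBReshape m q).contains s = true := by
  rw [pvBReshape_eq]
  simp [PySem.Dict.contains_insert, hs]

theorem pvBReshape_inner_contains (m : PySem.Dict String (PySem.Dict String Int))
    (q : (String × String) × Int) (s t : String)
    (ht : (m.getD s PySem.Dict.empty).contains t = true) :
    ((pvBReshape m q).getD s PySem.Dict.empty).contains t = true := by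
  rw [pvBReshape_eq]
  by_cases h : q.1.1 = s
  · subst h
    rw [PySem.Dict.getD_insert_self]
    simp [PySem.Dict.contains_insert, ht]
  · rw [PySem.Dict.getD_insert_of_ne _ _ _ (fun hh => h hh.symm)]
    exact ht

theorem pvPush (rest : List ((String × String) × Int)) (m : PySem.Dict String (PySem.Dict String Int))
    (s t : String) (hrest : ∀ q ∈ rest, q.1 ≠ (s, t)) (hs : m.contains s = true)
    (ht : (m.getD s PySem.Dict.empty).contains t = true) :
    pvNStep (rest.foldl pvBReshape m) (s, t) = rest.foldl pvBReshape (pvNStep m (s, t)) := by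
  induction rest generalizing m with
  | nil => rfl
  | cons q rest ih =>
    simp only [List.foldl_cons]
    rw [ih (pvBReshape m q) (fun x hx => hrest x (List.mem_cons_of_mem _ hx))
          (pvBReshape_contains m q s hs) (pvBReshape_inner_contains m q s t ht),
        pvCommute m q s t (hrest q (List.mem_cons_self)) hs ht]

theorem pvContainsReshapeAux (its : List ((String × String) × Int))
    (m : PySem.Dict String (PySem.Dict String Int)) (s t : String) :
    ((its.foldl pvBReshape m).getD s PySem.Dict.empty).contains t
      = ((m.getD s PySem.Dict.empty).contains t || its.any (fun q => q.1 == (s, t))) := by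
  induction its generalizing m with
  | nil => simp
  | cons q rest ih =>
    obtain ⟨⟨a1, a2⟩, b⟩ := q
    simp only [List.foldl_cons, List.any_cons]
    rw [ih]
    have h1 : ((pvBReshape m ((a1, a2), b)).getD s PySem.Dict.empty).contains t
        = (((m.getD s PySem.Dict.empty).contains t) || (((a1, a2) : String × String) == (s, t))) := by
      rw [pvBReshape_eq]
      by_cases h : a1 = s
      · subst h
        rw [PySem.Dict.getD_insert_self, PySem.Dict.contains_insert]
        by_cases h2 : a2 = t
        · subst h2; simp
        · have e1 : (t == a2) = false := by simp [Ne.symm h2]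
          have e2 : ((((a1, a2)) : String × String) == (a1, t)) = false :=
            beq_eq_false_iff_ne.mpr (by simp [h2])
          simp [e1, e2]
      · rw [PySem.Dict.getD_insert_of_ne _ _ _ (fun hh => h hh.symm)]
        simp [beq_iff_eq, h]
    rw [h1, Bool.or_assoc]

theorem pvReplace (its : List ((String × String) × Int)) (m : PySem.Dict String (PySem.Dict String Int))
    (p : String × String) (hnd : (its.map Prod.fst).Nodup) (hmem : p ∈ its.map Prod.fst) :
    (its.map (fun q => if q.1 == p then (p, q.2 + 1) else q)).foldl pvBReshape m
      = pvNStep (its.foldl pvBReshape m) p := by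
  obtain ⟨p1, p2⟩ := p
  induction its generalizing m with
  | nil => simp at hmem
  | cons q rest ih =>
    obtain ⟨qk, qv⟩ := q
    simp only [List.map_cons, List.nodup_cons] at hnd
    by_cases hq : qk = (p1, p2)
    · subst hq
      have hrest : ∀ q' ∈ rest, q'.1 ≠ ((p1, p2) : String × String) := by
        intro q' hq' h
        exact hnd.1 (by rw [← h]; exact List.mem_map_of_mem hq')
      have hmap : rest.map (fun q => if q.1 == ((p1, p2) : String × String) then ((p1, p2), q.2 + 1) else q) = rest := by
        rw [List.map_congr_left (g := id) ?_, List.map_id]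
        intro q' hq'
        simp [hrest q' hq']
      simp only [List.map_cons, List.foldl_cons, beq_self_eq_true, if_true, hmap]
      rw [pvPush rest (pvBReshape m ((p1, p2), qv)) p1 p2 ?h1 ?h2 ?h3]
      case h1 => exact hrest
      case h2 => rw [pvBReshape_eq]; exact PySem.Dict.contains_insert_self _ _ _
      case h3 =>
        rw [pvBReshape_eq, PySem.Dict.getD_insert_self]
        simp
      congr 1
      rw [pvBReshape_eq, pvBReshape_eq]
      simp only [pvNStep]
      rw [PySem.Dict.getD_insert_self, PySem.Dict.insert_insert_self,
          PySem.Dict.getD_insert_self, PySem.Dict.insert_insert_self]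
    · have hmemr : ((p1, p2) : String × String) ∈ rest.map Prod.fst := by
        simp only [List.map_cons, List.mem_cons] at hmem
        rcases hmem with h | h
        · exact absurd h.symm hq
        · exact h
      have hbeq : ((qk == ((p1, p2) : String × String)) : Bool) = false :=
        beq_eq_false_iff_ne.mpr hq
      simp only [List.map_cons, List.foldl_cons, hbeq, Bool.false_eq_true, if_false]
      exact ih (pvBReshape m (qk, qv)) hnd.2 hmemr

theorem pvStep (c : PySem.Dict (String × String) Int) (p : String × String)
    (hnd : c.keys.Nodup) : pvReshape (pvCStep c p) = pvNStep (pvReshape c) p := by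
  obtain ⟨s, t⟩ := p
  unfold pvReshape pvCStep
  by_cases hc : c.contains (s, t)
  · rw [PySem.Dict.items_insert_of_contains _ _ hc]
    have hmapeq : c.items.map (fun q => if q.1 == ((s, t) : String × String) then ((s, t), c.getD (s, t) 0 + 1) else q)
        = c.items.map (fun q => if q.1 == ((s, t) : String × String) then ((s, t), q.2 + 1) else q) := by
      apply List.map_congr_left
      intro q hq
      by_cases h : q.1 = ((s, t) : String × String)
      · have hv : c.getD (s, t) 0 = q.2 := by
          have hm : ((s, t), q.2) ∈ c.items := by rw [← h]; exact hq
          exact PySem.Dict.getD_of_mem_items _ hm hnd 0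
        simp [h, hv]
      · simp [h]
    rw [hmapeq]
    apply pvReplace
    · simpa [PySem.Dict.keys] using hnd
    · have := (PySem.Dict.contains_iff_mem_keys c (s, t)).mp hc
      simpa [PySem.Dict.keys] using this
  · rw [PySem.Dict.getD_of_not_contains _ _ (by simpa using hc),
        PySem.Dict.items_insert_of_not_contains _ _ (by simpa using hc),
        List.foldl_append]
    simp only [List.foldl_cons, List.foldl_nil]
    rw [pvBReshape_eq]
    unfold pvNStep
    have hcont : ((c.items.foldl pvBReshape PySem.Dict.empty).getD s PySem.Dict.empty).contains t = false := by
      rw [pvContainsReshapeAux]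
      simp only [PySem.Dict.getD_empty, PySem.Dict.contains_empty, Bool.false_or]
      rw [List.any_eq_false]
      intro q hq
      simp only [beq_iff_eq]
      intro h
      have hcq : c.contains q.1 = true := by
        rw [PySem.Dict.contains_iff_mem_keys]
        exact PySem.Dict.mem_keys_of_mem_items _ hq
      rw [h] at hcq
      exact hc hcq
    have hz : ((c.items.foldl pvBReshape PySem.Dict.empty).getD s PySem.Dict.empty).getD t 0 = 0 :=
      PySem.Dict.getD_of_not_contains _ _ hcont
    rw [hz]

theorem pvMain (l : List (String × String)) (c : PySem.Dict (String × String) Int)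
    (hnd : c.keys.Nodup) :
    pvReshape (l.foldl pvCStep c) = l.foldl pvNStep (pvReshape c) := by
  induction l generalizing c with
  | nil => rfl
  | cons p l ih =>
    simp only [List.foldl_cons]
    rw [ih (pvCStep c p) (by unfold pvCStep; exact PySem.Dict.nodup_keys_insert _ _ _ hnd),
        pvStep c p hnd]

theorem pvExtractA (flows : List (List (String × String)))
    (m : PySem.Dict String (PySem.Dict String Int))
    (h : ∀ f ∈ flows, ((PySem.Dict.ofList f).contains "source" && (PySem.Dict.ofList f).contains "target") = true) :
    flows.foldl pvAStep m = (flows.filterMap pvPair).foldl pvNStep m := by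
  induction flows generalizing m with
  | nil => rfl
  | cons f flows ih =>
    have hf := h f (List.mem_cons_self)
    simp only [Bool.and_eq_true, PySem.Dict.contains_eq_isSome_get?, Option.isSome_iff_exists] at hf
    obtain ⟨⟨s, hs⟩, t, ht⟩ := hf
    simp only [List.foldl_cons, List.filterMap_cons]
    rw [pvAStep_eq m f s t hs ht]
    have hp : pvPair f = some (s, t) := by unfold pvPair; rw [hs, ht]
    rw [hp]
    simp only [List.foldl_cons]
    exact ih _ (fun x hx => h x (List.mem_cons_of_mem _ hx))

theorem pvExtractB (flows : List (List (String × String)))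
    (c : PySem.Dict (String × String) Int)
    (h : ∀ f ∈ flows, ((PySem.Dict.ofList f).contains "source" && (PySem.Dict.ofList f).contains "target") = true) :
    flows.foldl pvBCount c = (flows.filterMap pvPair).foldl pvCStep c := by
  induction flows generalizing c with
  | nil => rfl
  | cons f flows ih =>
    have hf := h f (List.mem_cons_self)
    simp only [Bool.and_eq_true, PySem.Dict.contains_eq_isSome_get?, Option.isSome_iff_exists] at hf
    obtain ⟨⟨s, hs⟩, t, ht⟩ := hf
    simp only [List.foldl_cons, List.filterMap_cons]
    rw [pvBCount_eq c f s t hs ht]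
    have hp : pvPair f = some (s, t) := by unfold pvPair; rw [hs, ht]
    rw [hp]
    simp only [List.foldl_cons]
    exact ih _ (fun x hx => h x (List.mem_cons_of_mem _ hx))

-- ===== VERDICT (by name: the statement is the Claim_ definition above) =====
theorem create_frequency_matrix_py_spec : Claim_equal_create_frequency_matrix_py := by
  intro flows _ hpre
  simp only [Spec_create_frequency_matrix_py, create_frequency_matrix_py, create_frequency_matrix_py_alt]
  have h : ∀ f ∈ flows, ((PySem.Dict.ofList f).contains "source" && (PySem.Dict.ofList f).contains "target") = true := by
    unfold Pre_create_frequency_matrix_py at hpre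
    simpa [List.all_eq_true] using hpre
  rw [pvExtractA flows _ h, pvExtractB flows _ h]
  have hm := pvMain (flows.filterMap pvPair) PySem.Dict.empty PySem.Dict.nodup_keys_empty
  rw [show pvReshape (PySem.Dict.empty) = PySem.Dict.empty from rfl] at hm
  unfold pvReshape at hm
  rw [hm]
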